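-- pv_equiv track=rewrite | github.com/PeteJohn6/dotfile | hack/change-detection/main.py | any_match
-- ===== SOURCE A (Python) =====
-- from typing import Dict, Iterable, List
--
-- def normalize_path(value: str) -> str:
--     return value.replace("\\", "/").strip()
--
-- def matches_pattern(path: str, pattern: str) -> bool:
--     if pattern.endswith("/**"):
--         return path.startswith(pattern[:-2])
--     return path == pattern
--
-- def any_match(paths: Iterable[str], patterns: Iterable[str]) -> bool:
--     normalized_patterns = [normalize_path(pattern) for pattern in patterns]
--     for raw_path in paths:
--         path = normalize_path(raw_path)
--         if not path:
--             continue
--         for pattern in normalized_patterns: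
--             if matches_pattern(path, pattern):
--                 return True
--     return False
-- ===== SOURCE B (Python) =====
-- def normalize_path(value: str) -> str:
--     return value.replace("\\", "/").strip()
--
--
-- def any_match(paths, patterns) -> bool:
--     # Index the patterns once: exact patterns in a hash set, and for "dir/**"
--     # patterns the stem "dir/" in a second hash set.  A path matches a
--     # prefix pattern iff one of its prefixes ending at a '/' is in that set.
--     exact = set()
--     prefixes = set()
--     for pattern in patterns:
--         p = normalize_path(pattern)
--         if p.endswith("/**"):
--             prefixes.add(p[:-2])
--         else:
--             exact.add(p)
--     for raw_path in paths:
--         path = normalize_path(raw_path)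
--         if not path:
--             continue
--         if path in exact:
--             return True
--         for i, ch in enumerate(path):
--             if ch == "/" and path[: i + 1] in prefixes:
--                 return True
--     return False
-- ===== Notes on version B (the rewrite author's own statement) =====
-- stated objective: alternative
-- what changed: Instead of scanning every pattern for every path, B indexes the patterns once (exact patterns in a hash set, the 'dir/' stems of 'dir/**' patterns in a second set) and matches each path by one exact-set lookup plus one lookup per '/'-ending prefix of the path, so the inner scan over patterns disappears.
import Mathlib
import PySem

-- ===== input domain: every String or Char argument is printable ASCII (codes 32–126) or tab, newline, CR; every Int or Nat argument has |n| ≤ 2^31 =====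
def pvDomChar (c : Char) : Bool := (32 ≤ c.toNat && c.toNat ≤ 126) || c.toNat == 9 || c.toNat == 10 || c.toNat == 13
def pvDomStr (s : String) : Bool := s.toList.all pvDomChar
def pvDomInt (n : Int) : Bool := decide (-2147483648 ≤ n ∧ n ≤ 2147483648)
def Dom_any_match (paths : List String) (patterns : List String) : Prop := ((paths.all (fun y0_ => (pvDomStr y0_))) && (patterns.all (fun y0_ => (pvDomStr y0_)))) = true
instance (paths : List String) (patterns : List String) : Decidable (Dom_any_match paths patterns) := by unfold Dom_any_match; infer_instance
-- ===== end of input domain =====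

-- B indexes the patterns once (exact patterns in a set, the 'dir/' stems of 'dir/**'
-- patterns in a second set) and matches each path by set lookups on its '/'-ending
-- prefixes, removing A's inner scan over all patterns (objective: alternative).

-- ===== PORT A =====
def pvNorm (value : String) : String :=
  PySem.Str.strip (PySem.Str.replace value "\\" "/")

def pvMatchesPattern (path : String) (pattern : String) : Bool :=
  if PySem.Str.endswith pattern "/**" then
    PySem.Str.startswith path (String.ofList (PySem.List.slice pattern.toList none (some (-2))))
  else
    path == pattern

def any_match (paths : List String) (patterns : List String) : Bool :=
  let normalized_patterns := patterns.map pvNorm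
  paths.any (fun raw_path =>
    let path := pvNorm raw_path
    !(path == "") && normalized_patterns.any (fun pattern => pvMatchesPattern path pattern))

-- ===== PORT B =====
-- one pass over the patterns: (exact patterns, "dir/" stems of "dir/**" patterns)
def pvIndexPatterns (patterns : List String) : PySem.Set String × PySem.Set String :=
  patterns.foldl (fun acc pattern =>
    let p := pvNorm pattern
    if PySem.Str.endswith p "/**" then
      (acc.1, PySem.Set.add acc.2 (String.ofList (PySem.List.slice p.toList none (some (-2)))))
    else
      (PySem.Set.add acc.1 p, acc.2))
    (PySem.Set.empty, PySem.Set.empty)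

def any_match_alt (paths : List String) (patterns : List String) : Bool :=
  let idx := pvIndexPatterns patterns
  paths.any (fun raw_path =>
    let path := pvNorm raw_path
    !(path == "") &&
      (PySem.Set.contains idx.1 path ||
        (PySem.List.enumerate path.toList).any (fun ic =>
          ic.2 == '/' &&
            PySem.Set.contains idx.2 (String.ofList (PySem.List.slice path.toList none (some (ic.1 + 1)))))))

-- ===== PRECONDITION & SPEC =====
def Spec_any_match (paths : List String) (patterns : List String) (out : Bool) : Prop := out = any_match_alt paths patterns
instance (paths : List String) (patterns : List String) (out : Bool) : Decidable (Spec_any_match paths patterns out) := by unfold Spec_any_match; infer_instance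

-- ===== CLAIM (what is proved, stated in full; the proofs are below) =====
def Claim_equal_any_match : Prop := ∀ (paths : List String) (patterns : List String), Dom_any_match paths patterns → Spec_any_match paths patterns (any_match paths patterns)

-- ===== LEMMAS AND PROOFS =====

-- membership in the two pattern indexes
theorem pv_mem_index (patterns : List String) (x : String) :
    (x ∈ (pvIndexPatterns patterns).1 ↔
      ∃ pat ∈ patterns, PySem.Str.endswith (pvNorm pat) "/**" = false ∧ pvNorm pat = x) ∧
    (x ∈ (pvIndexPatterns patterns).2 ↔
      ∃ pat ∈ patterns, PySem.Str.endswith (pvNorm pat) "/**" = true ∧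
        String.ofList (PySem.List.slice (pvNorm pat).toList none (some (-2))) = x) := by
  have aux : ∀ (ps : List String) (init : PySem.Set String × PySem.Set String),
      (x ∈ (ps.foldl (fun acc pattern =>
          let p := pvNorm pattern
          if PySem.Str.endswith p "/**" then
            (acc.1, PySem.Set.add acc.2 (String.ofList (PySem.List.slice p.toList none (some (-2)))))
          else
            (PySem.Set.add acc.1 p, acc.2)) init).1 ↔
        x ∈ init.1 ∨ ∃ pat ∈ ps, PySem.Str.endswith (pvNorm pat) "/**" = false ∧ pvNorm pat = x) ∧
      (x ∈ (ps.foldl (fun acc pattern =>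
          let p := pvNorm pattern
          if PySem.Str.endswith p "/**" then
            (acc.1, PySem.Set.add acc.2 (String.ofList (PySem.List.slice p.toList none (some (-2)))))
          else
            (PySem.Set.add acc.1 p, acc.2)) init).2 ↔
        x ∈ init.2 ∨ ∃ pat ∈ ps, PySem.Str.endswith (pvNorm pat) "/**" = true ∧
          String.ofList (PySem.List.slice (pvNorm pat).toList none (some (-2))) = x) := by
    intro ps
    induction ps with
    | nil => intro init; simp
    | cons pat rest ih =>
      intro init
      simp only [List.foldl_cons]
      by_cases h : PySem.Str.endswith (pvNorm pat) "/**" = true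
      · rcases ih (init.1, PySem.Set.add init.2
            (String.ofList (PySem.List.slice (pvNorm pat).toList none (some (-2))))) with ⟨ih1, ih2⟩
        constructor
        · simp only [h, if_pos] at ih1 ⊢
          rw [ih1]
          simp only [List.mem_cons]
          constructor
          · rintro (h1 | ⟨p, hp, he, hx⟩)
            · exact Or.inl h1
            · exact Or.inr ⟨p, Or.inr hp, he, hx⟩
          · rintro (h1 | ⟨p, (rfl | hp), he, hx⟩)
            · exact Or.inl h1
            · rw [h] at he; cases he
            · exact Or.inr ⟨p, hp, he, hx⟩
        · simp only [h, if_pos] at ih2 ⊢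
          rw [ih2, PySem.Set.mem_add]
          simp only [List.mem_cons]
          constructor
          · rintro ((h1 | rfl) | ⟨p, hp, he, hx⟩)
            · exact Or.inl h1
            · exact Or.inr ⟨pat, Or.inl rfl, h, rfl⟩
            · exact Or.inr ⟨p, Or.inr hp, he, hx⟩
          · rintro (h1 | ⟨p, (rfl | hp), he, hx⟩)
            · exact Or.inl (Or.inl h1)
            · exact Or.inl (Or.inr hx.symm)
            · exact Or.inr ⟨p, hp, he, hx⟩
      · rw [Bool.not_eq_true] at h
        rcases ih (PySem.Set.add init.1 (pvNorm pat), init.2) with ⟨ih1, ih2⟩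
        constructor
        · simp only [h, Bool.false_eq_true, if_false] at ih1 ⊢
          rw [ih1, PySem.Set.mem_add]
          simp only [List.mem_cons]
          constructor
          · rintro ((h1 | rfl) | ⟨p, hp, he, hx⟩)
            · exact Or.inl h1
            · exact Or.inr ⟨pat, Or.inl rfl, h, rfl⟩
            · exact Or.inr ⟨p, Or.inr hp, he, hx⟩
          · rintro (h1 | ⟨p, (rfl | hp), he, hx⟩)
            · exact Or.inl (Or.inl h1)
            · exact Or.inl (Or.inr hx.symm)
            · exact Or.inr ⟨p, hp, he, hx⟩
        · simp only [h, Bool.false_eq_true, if_false] at ih2 ⊢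
          rw [ih2]
          simp only [List.mem_cons]
          constructor
          · rintro (h1 | ⟨p, hp, he, hx⟩)
            · exact Or.inl h1
            · exact Or.inr ⟨p, Or.inr hp, he, hx⟩
          · rintro (h1 | ⟨p, (rfl | hp), he, hx⟩)
            · exact Or.inl h1
            · rw [h] at he; cases he
            · exact Or.inr ⟨p, hp, he, hx⟩
      
  rcases aux patterns (PySem.Set.empty, PySem.Set.empty) with ⟨h1, h2⟩
  unfold pvIndexPatterns
  constructor
  · rw [h1]; simp [PySem.Set.empty]
  · rw [h2]; simp [PySem.Set.empty]

-- a nonempty prefix ending in '/' is a prefix of cs iff it is cs.take (k+1) for some '/' position k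
theorem pv_prefix_slash (cs q : List Char) :
    (q ++ ['/'] <+: cs) ↔ ∃ k, ∃ h : k < cs.length, cs[k] = '/' ∧ cs.take (k + 1) = q ++ ['/'] := by
  constructor
  · rintro ⟨t, rfl⟩
    refine ⟨q.length, by simp, ?_, ?_⟩
    · rw [List.getElem_append_left (by simp)]
      simp
    · exact List.take_left' (by simp)
  · rintro ⟨k, hk, _, htake⟩
    rw [← htake]
    exact List.take_prefix _ _

-- a "dir/**" pattern decomposes as q ++ "/**", and pattern[:-2] is then q ++ "/"
theorem pv_stem (p : String) (h : PySem.Str.endswith p "/**" = true) :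
    ∃ q : List Char, p.toList = q ++ ['/', '*', '*'] ∧
      PySem.List.slice p.toList none (some (-2)) = q ++ ['/'] := by
  rw [PySem.Str.endswith_eq, PySem.Chars.endswith_iff] at h
  obtain ⟨q, hq⟩ := h
  have hq' : p.toList = q ++ ['/', '*', '*'] := by rw [← hq]; congr 1
  refine ⟨q, hq', ?_⟩
  rw [hq']
  have h3 : (q ++ ['/', '*', '*']).take (q.length + 1) = q ++ ['/'] := by
    rw [List.take_append]; simp
  simp only [PySem.List.slice]
  norm_num
  convert h3 using 2

-- path[:i+1] for the enumerate index i = k is take (k+1)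
theorem pv_slice_take (cs : List Char) (k : Nat) :
    PySem.List.slice cs none (some ((0 : Int) + (k : Int) + 1)) = cs.take (k + 1) := by
  have hb : (0 : Int) + (k : Int) + 1 = ((k + 1 : Nat) : Int) := by push_cast; ring
  rw [hb, PySem.List.slice_to _ (by positivity)]
  simp

-- the per-path match decision is the same for both programs
theorem pv_per_path (patterns : List String) (path : String) :
    (patterns.map pvNorm).any (fun pattern => pvMatchesPattern path pattern) =
      (PySem.Set.contains (pvIndexPatterns patterns).1 path ||
        (PySem.List.enumerate path.toList).any (fun ic =>
          ic.2 == '/' &&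
            PySem.Set.contains (pvIndexPatterns patterns).2
              (String.ofList (PySem.List.slice path.toList none (some (ic.1 + 1)))))) := by
  rw [Bool.eq_iff_iff, Bool.or_eq_true, List.any_eq_true, List.any_eq_true]
  constructor
  · rintro ⟨pp, hpp, hm⟩
    rw [List.mem_map] at hpp
    obtain ⟨pat, hpat, rfl⟩ := hpp
    by_cases he : PySem.Str.endswith (pvNorm pat) "/**" = true
    · obtain ⟨q, hq, hslice⟩ := pv_stem _ he
      unfold pvMatchesPattern at hm
      rw [if_pos he, hslice, PySem.Str.startswith_eq, PySem.Chars.startswith_iff,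
        String.toList_ofList] at hm
      obtain ⟨k, hk, hsl, htake⟩ := (pv_prefix_slash path.toList q).mp hm
      refine Or.inr ⟨((0 : Int) + (k : Int), path.toList[k]), ?_, ?_⟩
      · rw [PySem.List.mem_enumerate_iff]; exact ⟨k, hk, rfl⟩
      · rw [Bool.and_eq_true, beq_iff_eq]
        refine ⟨hsl, ?_⟩
        rw [PySem.Set.contains_iff, pv_slice_take, htake]
        exact ((pv_mem_index patterns _).2).mpr ⟨pat, hpat, he, by rw [hslice]⟩
    · rw [Bool.not_eq_true] at he
      unfold pvMatchesPattern at hm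
      rw [if_neg (by simp only [he]; decide), beq_iff_eq] at hm
      refine Or.inl ?_
      rw [PySem.Set.contains_iff]
      exact ((pv_mem_index patterns path).1).mpr ⟨pat, hpat, he, hm.symm⟩
  · rintro (h | ⟨ic, hic, hcond⟩)
    · rw [PySem.Set.contains_iff, (pv_mem_index patterns path).1] at h
      obtain ⟨pat, hpat, he, hx⟩ := h
      refine ⟨pvNorm pat, List.mem_map_of_mem hpat, ?_⟩
      unfold pvMatchesPattern
      rw [if_neg (by simp only [he]; decide), beq_iff_eq]
      exact hx.symm
    · rw [PySem.List.mem_enumerate_iff] at hic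
      obtain ⟨k, hk, rfl⟩ := hic
      rw [Bool.and_eq_true, beq_iff_eq] at hcond
      obtain ⟨hsl, hmem⟩ := hcond
      rw [PySem.Set.contains_iff, pv_slice_take, (pv_mem_index patterns _).2] at hmem
      obtain ⟨pat, hpat, he, hx⟩ := hmem
      obtain ⟨q, hq, hslice⟩ := pv_stem _ he
      refine ⟨pvNorm pat, List.mem_map_of_mem hpat, ?_⟩
      unfold pvMatchesPattern
      rw [if_pos he, hslice, PySem.Str.startswith_eq, PySem.Chars.startswith_iff,
        String.toList_ofList]
      refine (pv_prefix_slash path.toList q).mpr ⟨k, hk, hsl, ?_⟩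
      rw [hslice] at hx
      exact (String.ofList_inj.mp hx).symm

-- ===== VERDICT (by name: the statement is the Claim_ definition above) =====
theorem any_match_spec : Claim_equal_any_match := by
  intro paths patterns _
  show any_match paths patterns = any_match_alt paths patterns
  unfold any_match any_match_alt
  refine List.any_congr rfl (fun raw => ?_)
  simp only [pv_per_path]
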